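-- pv_equiv track=rewrite | github.com/ulnessd/FiguratePartitionExplorer | symmetric_group.py | psi_term_for_cycle_type
-- ===== SOURCE A (Python) =====
-- from typing import List, Dict, Tuple
--
-- def cycle_type_multiplicities(cycle_type: Tuple[int, ...]) -> Dict[int, int]:
--     """
--     Given a cycle type as a tuple of lengths, e.g. (3, 2, 2, 1),
--     return a dict mapping length -> multiplicity, e.g. {3:1, 2:2, 1:1}.
--     """
--     mult: Dict[int, int] = {}
--     for length in cycle_type:
--         mult[length] = mult.get(length, 0) + 1
--     return mult
--
-- def psi_term_for_cycle_type(cycle_type: Tuple[int, ...]) -> str: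
--     """
--     Return a string describing the generic ψ-term structure for this cycle type.
--
--     If a cycle type has m_1 1-cycles, m_2 2-cycles, etc., the term is:
--
--         ψ(q)^m_1 * ψ(q^2)^m_2 * ψ(q^3)^m_3 * ...
--
--     We use a compact textual form like:
--         "ψ(q)^2 ψ(q^2) ψ(q^3)^2"
--     """
--     mult = cycle_type_multiplicities(cycle_type)
--     pieces: List[str] = []
--     for length in sorted(mult.keys()):
--         count = mult[length]
--         if length == 1:
--             base = "ψ(q)"
--         else:
--             base = f"ψ(q^{length})"
--         if count == 1:
--             pieces.append(base)
--         else: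
--             pieces.append(f"{base}^{count}")
--     return " ".join(pieces)
-- ===== SOURCE B (Python) =====
-- def psi_term_for_cycle_type(cycle_type):
--     """Sort the cycle type and walk it once, emitting one piece per run of
--     equal lengths; no multiplicity dict is built."""
--     s = sorted(cycle_type)
--     pieces = []
--     i, n = 0, len(s)
--     while i < n:
--         j = i
--         while j < n and s[j] == s[i]:
--             j += 1
--         length, count = s[i], j - i
--         base = "ψ(q)" if length == 1 else f"ψ(q^{length})"
--         pieces.append(base if count == 1 else f"{base}^{count}")
--         i = j
--     return " ".join(pieces)
-- ===== Notes on version B (the rewrite author's own statement) =====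
-- stated objective: idiomatic
-- what changed: Replaces the multiplicity dict (hash-count then sort the keys) with a single sort-then-group pass that scans runs of equal cycle lengths directly, building no auxiliary map.
import Mathlib
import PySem

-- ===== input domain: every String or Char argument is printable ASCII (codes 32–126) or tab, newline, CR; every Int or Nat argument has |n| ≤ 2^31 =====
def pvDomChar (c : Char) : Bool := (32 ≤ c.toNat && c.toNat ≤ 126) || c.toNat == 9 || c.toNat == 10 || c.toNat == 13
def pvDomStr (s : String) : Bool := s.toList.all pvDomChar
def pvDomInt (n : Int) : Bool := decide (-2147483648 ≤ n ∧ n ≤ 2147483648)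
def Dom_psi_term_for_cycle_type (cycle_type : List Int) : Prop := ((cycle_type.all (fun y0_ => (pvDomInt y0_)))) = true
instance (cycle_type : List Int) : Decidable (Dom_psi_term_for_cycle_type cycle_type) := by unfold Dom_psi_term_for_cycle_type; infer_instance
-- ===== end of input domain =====

-- B replaces A's multiplicity dict + key sort by a single sort-then-group-runs pass (objective: simpler / more idiomatic); same output.

-- ===== PORT A =====
-- cycle_type_multiplicities: mult[length] = mult.get(length, 0) + 1
def pvMult (cycle_type : List Int) : PySem.Dict Int Int :=
  cycle_type.foldl (fun d x => d.insert x (d.getD x 0 + 1)) PySem.Dict.empty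

def psi_term_for_cycle_type (cycle_type : List Int) : String :=
  let mult := pvMult cycle_type
  let pieces := (PySem.List.sorted mult.keys (fun x => x) false).foldl
    (fun ps length =>
      -- mult[length]: the key is always present, so .getD _ 0 equals Python's mult[length]
      let count := mult.getD length 0
      let base := if length == 1 then "ψ(q)" else "ψ(q^" ++ PySem.Int.toStr length ++ ")"
      ps ++ [if count == 1 then base else base ++ "^" ++ PySem.Int.toStr count]) []
  PySem.Str.join " " pieces

-- ===== PORT B =====
-- the formatting of one piece (B's loop body after the run is measured)
def pvPiece (length : Int) (count : Int) : String :=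
  let base := if length == 1 then "ψ(q)" else "ψ(q^" ++ PySem.Int.toStr length ++ ")"
  if count == 1 then base else base ++ "^" ++ PySem.Int.toStr count

-- the inner `while j < n and s[j] == s[i]` run-scanner of Source B, as structural recursion
def pvRuns (l : List Int) : List (Int × Int) :=
  match l with
  | [] => []
  | x :: xs =>
    (x, 1 + ((xs.takeWhile (fun y => y == x)).length : Int)) ::
      pvRuns (xs.dropWhile (fun y => y == x))
termination_by l.length
decreasing_by
  simp only [List.length_cons]
  exact Nat.lt_succ_of_le (List.length_dropWhile_le _ _)

def psi_term_for_cycle_type_alt (cycle_type : List Int) : String :=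
  PySem.Str.join " "
    ((pvRuns (PySem.List.sorted cycle_type (fun x => x) false)).map (fun p => pvPiece p.1 p.2))

-- ===== PRECONDITION & SPEC =====
def Spec_psi_term_for_cycle_type (cycle_type : List Int) (out : String) : Prop := out = psi_term_for_cycle_type_alt cycle_type
instance (cycle_type : List Int) (out : String) : Decidable (Spec_psi_term_for_cycle_type cycle_type out) := by unfold Spec_psi_term_for_cycle_type; infer_instance

-- ===== CLAIM (what is proved, stated in full; the proofs are below) =====
def Claim_equal_psi_term_for_cycle_type : Prop := ∀ (cycle_type : List Int), Dom_psi_term_for_cycle_type cycle_type → Spec_psi_term_for_cycle_type cycle_type (psi_term_for_cycle_type cycle_type)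

-- ===== LEMMAS AND PROOFS =====

-- accumulate-append loop = map
theorem pvFoldlAppendMap (f : Int → String) (l : List Int) (acc : List String) :
    l.foldl (fun ps k => ps ++ [f k]) acc = acc ++ l.map f := by
  induction l generalizing acc with
  | nil => simp
  | cons x xs ih => simp [List.foldl_cons, ih, List.map_cons]

-- in a ≤-sorted list x :: xs, everything after the x-run is strictly greater than x
theorem pvDropWhileGt (x : Int) (xs : List Int)
    (hp : (x :: xs).Pairwise (fun a b => a ≤ b)) :
    ∀ y ∈ xs.dropWhile (fun y => y == x), x < y := by
  induction xs with
  | nil => simp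
  | cons a as ih =>
    rcases List.pairwise_cons.mp hp with ⟨hx, hp'⟩
    by_cases h : (a == x) = true
    · intro y hy
      apply ih
      · refine List.pairwise_cons.mpr ⟨?_, (List.pairwise_cons.mp hp').2⟩
        intro b hb; exact hx b (by simp [hb])
      · simpa [List.dropWhile, h] using hy
    · intro y hy
      simp only [List.dropWhile, h] at hy
      have hax : a ≠ x := by simpa using h
      have hxa : x < a := lt_of_le_of_ne (hx a (by simp)) (Ne.symm hax)
      rcases List.mem_cons.mp hy with rfl | hy
      · exact hxa
      · exact lt_of_lt_of_le hxa ((List.pairwise_cons.mp hp').1 y hy)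

theorem pvRunsMemFst (l : List Int) : ∀ k, k ∈ (pvRuns l).map Prod.fst ↔ k ∈ l := by
  induction l using pvRuns.induct with
  | case1 => simp [pvRuns]
  | case2 x xs ih =>
    intro k
    rw [pvRuns]
    simp only [List.map_cons, List.mem_cons, ih k]
    constructor
    · rintro (rfl | h)
      · simp
      · exact Or.inr ((List.dropWhile_sublist (l := xs) (p := fun y => y == x)).subset h)
    · rintro (rfl | h)
      · exact Or.inl rfl
      · rw [← List.takeWhile_append_dropWhile (p := fun y => y == x) (l := xs)] at h
        rcases List.mem_append.mp h with h | h
        · have hb := List.mem_takeWhile_imp h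
          exact Or.inl (eq_of_beq hb)
        · exact Or.inr h

theorem pvRunsCount (l : List Int) (hp : l.Pairwise (fun a b => a ≤ b)) :
    ∀ p ∈ pvRuns l, p.2 = (l.count p.1 : Int) := by
  induction l using pvRuns.induct with
  | case1 => simp [pvRuns]
  | case2 x xs ih =>
    intro p hp'
    have hsplit := List.takeWhile_append_dropWhile (p := fun y => y == x) (l := xs)
    have hgt := pvDropWhileGt x xs hp
    have hpd : (xs.dropWhile (fun y => y == x)).Pairwise (fun a b => a ≤ b) :=
      List.Pairwise.sublist (List.dropWhile_sublist _) ((List.pairwise_cons.mp hp).2)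
    have h1 : (xs.takeWhile (fun y => y == x)).count x
        = (xs.takeWhile (fun y => y == x)).length := by
      apply List.count_eq_length.mpr
      intro y hy
      have hb := List.mem_takeWhile_imp hy
      exact (eq_of_beq hb).symm
    have h2 : (xs.dropWhile (fun y => y == x)).count x = 0 := by
      apply List.count_eq_zero.mpr
      intro hx
      exact absurd rfl (ne_of_gt (hgt x hx))
    have hxc : xs.count x = (xs.takeWhile (fun y => y == x)).length := by
      conv_lhs => rw [← hsplit]
      rw [List.count_append, h1, h2]
      simp
    rw [pvRuns] at hp'
    rcases List.mem_cons.mp hp' with rfl | hmem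
    · simp only
      rw [List.count_cons_self, hxc]
      push_cast
      omega
    · have h2' := ih hpd p hmem
      have hkmem : p.1 ∈ xs.dropWhile (fun y => y == x) :=
        (pvRunsMemFst _ p.1).mp (List.mem_map.mpr ⟨p, hmem, rfl⟩)
      have hne : p.1 ≠ x := ne_of_gt (hgt p.1 hkmem)
      have h3 : (xs.takeWhile (fun y => y == x)).count p.1 = 0 := by
        apply List.count_eq_zero.mpr
        intro hx
        have hb := List.mem_takeWhile_imp hx
        exact hne (eq_of_beq hb)
      have h4 : (x :: xs).count p.1 = (xs.dropWhile (fun y => y == x)).count p.1 := by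
        rw [List.count_cons]
        conv_lhs => rw [← hsplit]
        rw [List.count_append, h3]
        simp [Ne.symm hne]
      rw [h2', h4]
    
theorem pvRunsPairwise (l : List Int) (hp : l.Pairwise (fun a b => a ≤ b)) :
    ((pvRuns l).map Prod.fst).Pairwise (fun a b => a < b) := by
  induction l using pvRuns.induct with
  | case1 => simp [pvRuns]
  | case2 x xs ih =>
    have hgt := pvDropWhileGt x xs hp
    have hpd : (xs.dropWhile (fun y => y == x)).Pairwise (fun a b => a ≤ b) :=
      List.Pairwise.sublist (List.dropWhile_sublist _) ((List.pairwise_cons.mp hp).2)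
    rw [pvRuns]
    simp only [List.map_cons]
    refine List.pairwise_cons.mpr ⟨?_, ih hpd⟩
    intro k hk
    exact hgt k ((pvRunsMemFst _ k).mp hk)

-- the run keys of the sorted list are exactly sorted(set(xs))
theorem pvRunsKeys (xs : List Int) :
    PySem.List.sorted (PySem.Set.ofList xs) (fun x => x) false
      = (pvRuns (PySem.List.sorted xs (fun x => x) false)).map Prod.fst := by
  set l := PySem.List.sorted xs (fun x => x) false with hl
  have hp : l.Pairwise (fun a b => a ≤ b) := PySem.List.sorted_pairwise xs (fun x => x)
  have hpw := pvRunsPairwise l hp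
  have hnd : ((pvRuns l).map Prod.fst).Nodup := hpw.imp (fun h => ne_of_lt h)
  have hmem : ∀ k, k ∈ (pvRuns l).map Prod.fst ↔ k ∈ PySem.Set.ofList xs := by
    intro k
    rw [pvRunsMemFst l k, PySem.Set.mem_ofList, hl, PySem.List.mem_sorted]
  have hperm : ((pvRuns l).map Prod.fst).Perm (PySem.Set.ofList xs) :=
    (List.perm_ext_iff_of_nodup hnd (PySem.Set.nodup_ofList xs)).mpr hmem
  apply PySem.List.sorted_eq_of_perm_of_pairwise_lt
  · exact hperm
  · exact hpw

-- ===== VERDICT (by name: the statement is the Claim_ definition above) =====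
theorem psi_term_for_cycle_type_spec : Claim_equal_psi_term_for_cycle_type := by
  intro xs _
  show psi_term_for_cycle_type xs = psi_term_for_cycle_type_alt xs
  have hA : psi_term_for_cycle_type xs
      = PySem.Str.join " " ((PySem.List.sorted (pvMult xs).keys (fun x => x) false).foldl
          (fun ps k => ps ++ [pvPiece k ((pvMult xs).getD k 0)]) []) := rfl
  rw [hA]
  unfold pvMult
  rw [PySem.Dict.foldl_insert_getD_add_one_eq_counter xs, PySem.Dict.keys_counter,
    pvFoldlAppendMap (fun k => pvPiece k ((PySem.Dict.counter xs).getD k 0))]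
  simp only [List.nil_append, PySem.Dict.getD_counter]
  unfold psi_term_for_cycle_type_alt
  rw [pvRunsKeys xs, List.map_map]
  congr 1
  apply List.map_congr_left
  intro p hpmem
  have hp : (PySem.List.sorted xs (fun x => x) false).Pairwise (fun a b => a ≤ b) :=
    PySem.List.sorted_pairwise xs (fun x => x)
  have hc := pvRunsCount _ hp p hpmem
  have hcx : (PySem.List.sorted xs (fun x => x) false).count p.1 = xs.count p.1 :=
    (PySem.List.sorted_perm xs (fun x => x) false).count_eq p.1
  simp only [Function.comp_apply]
  rw [hc, hcx]
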